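-- pv_equiv track=rewrite | github.com/samirsuperman786/Study112 | Quizzes/Recursion/CT-S17-1.py | ct1
-- ===== SOURCE A (Python) =====
-- def ct1(L):
--     if (L == [ ]):
--         return L
--     elif (L[-1] % 2	== 0):
--         R =	L[::-1]
--         return [ 7, max(L[:2]) ] + ct1(R[:-2])
--     else:
--         return ct1(L[:-2]) + [ 8, sum(L[:2]) ]
-- ===== SOURCE B (Python) =====
-- def ct1(L):
--     # Single linear pass with two pointers and a direction flag; no slicing or reversal.
--     lo, hi, fwd = 0, len(L) - 1, True
--     front = []
--     back = []  # collected in reverse order of the final tail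
--     while lo <= hi:
--         last = L[hi] if fwd else L[lo]
--         if lo == hi:
--             two = [L[lo]]
--         elif fwd:
--             two = [L[lo], L[lo + 1]]
--         else:
--             two = [L[hi], L[hi - 1]]
--         if last % 2 == 0:
--             front.append(7)
--             front.append(max(two))
--             if fwd:
--                 lo += 2
--             else:
--                 hi -= 2
--             fwd = not fwd
--         else:
--             back.append(sum(two))
--             back.append(8)
--             if fwd:
--                 hi -= 2
--             else:
--                 lo += 2
--     back.reverse()
--     return front + back
-- ===== Notes on version B (the rewrite author's own statement) =====
-- stated objective: faster
-- what changed: Replaced the recursive slice-and-reverse definition (each step copies and/or reverses the remaining list) by a single iterative two-pointer pass with a direction flag that only reads elements by index and concatenates two accumulators once at the end.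
import Mathlib
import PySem

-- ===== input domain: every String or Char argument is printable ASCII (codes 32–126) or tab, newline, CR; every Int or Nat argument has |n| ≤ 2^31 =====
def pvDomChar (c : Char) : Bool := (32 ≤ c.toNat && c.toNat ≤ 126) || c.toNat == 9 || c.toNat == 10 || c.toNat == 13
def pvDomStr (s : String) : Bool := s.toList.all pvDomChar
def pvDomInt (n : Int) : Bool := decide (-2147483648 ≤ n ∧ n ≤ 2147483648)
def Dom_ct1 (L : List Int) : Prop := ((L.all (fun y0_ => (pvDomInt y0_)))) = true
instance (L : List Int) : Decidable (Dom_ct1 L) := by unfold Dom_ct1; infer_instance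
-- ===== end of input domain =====

-- B replaces A's recursive slice-and-reverse with one iterative two-pointer pass (direction flag,
-- two accumulators); measured asymptotically faster (O(n) vs O(n^2)).


-- ===== PORT A =====
-- L[-1], max(L[:2]) are always in range / on nonempty lists in the branches where A evaluates
-- them (L ≠ []), so the total forms pyGetD / max?.getD are exact there.  The recursion is
-- transcribed with a fuel counter (each call drops ≥ 2 elements, so L.length fuel suffices).
def ct1Go (fuel : Nat) (L : List Int) : List Int :=
  match fuel with
  | 0 => L
  | f+1 =>
    if h : L = [] then L
    else if PySem.Int.mod (PySem.List.pyGetD L (-1) 0) 2 = 0 then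
      let R := (PySem.List.slice? L none none (-1)).getD []
      [7, (PySem.List.max? (PySem.List.slice L none (some 2)) (fun x => x)).getD 0]
        ++ ct1Go f (PySem.List.slice R none (some (-2)))
    else
      ct1Go f (PySem.List.slice L none (some (-2))) ++ [8, (PySem.List.slice L none (some 2)).sum]

def ct1 (L : List Int) : List Int := ct1Go L.length L

-- ===== PORT B =====
-- within the loop lo, hi, lo+1, hi-1 are nonnegative in-range indices, so List.getD is exact
-- for Python's L[i]; the while loop is transcribed with a fuel counter (each iteration shrinks
-- the window by 2, so L.length fuel suffices)
def ct1Loop (L : List Int) (fuel : Nat) (lo hi : Int) (fwd : Bool) (front back : List Int) : List Int :=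
  match fuel with
  | 0 => front ++ back.reverse
  | f+1 =>
    if lo ≤ hi then
      let last := if fwd then L.getD hi.toNat 0 else L.getD lo.toNat 0
      let two := if lo = hi then [L.getD lo.toNat 0]
        else if fwd then [L.getD lo.toNat 0, L.getD (lo+1).toNat 0]
        else [L.getD hi.toNat 0, L.getD (hi-1).toNat 0]
      if PySem.Int.mod last 2 = 0 then
        if fwd then ct1Loop L f (lo+2) hi (!fwd) (front ++ [7, (PySem.List.max? two (fun x => x)).getD 0]) back
        else ct1Loop L f lo (hi-2) (!fwd) (front ++ [7, (PySem.List.max? two (fun x => x)).getD 0]) back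
      else
        if fwd then ct1Loop L f lo (hi-2) fwd front (back ++ [two.sum, 8])
        else ct1Loop L f (lo+2) hi fwd front (back ++ [two.sum, 8])
    else front ++ back.reverse

def ct1_alt (L : List Int) : List Int := ct1Loop L L.length 0 ((L.length : Int) - 1) true [] []

-- ===== PRECONDITION & SPEC =====
def Spec_ct1 (L : List Int) (out : List Int) : Prop := out = ct1_alt L
instance (L : List Int) (out : List Int) : Decidable (Spec_ct1 L out) := by unfold Spec_ct1; infer_instance

-- ===== CLAIM (what is proved, stated in full; the proofs are below) =====
def Claim_equal_ct1 : Prop := ∀ (L : List Int), Dom_ct1 L → Spec_ct1 L (ct1 L)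

-- ===== LEMMAS AND PROOFS =====

-- generic list facts used by the equivalence proof
lemma rev_take_sub_two (v : List Int) : v.reverse.take (v.length - 2) = (v.drop 2).reverse := by
  rcases v with _|⟨a, _|⟨b, t⟩⟩
  · simp
  · simp
  · have hrev : (a :: b :: t).reverse = t.reverse ++ [b, a] := by simp
    rw [hrev]
    simp

lemma take_two_of_le (l : List Int) (h : 2 ≤ l.length) : l.take 2 = [l.getD 0 0, l.getD 1 0] := by
  rcases l with _|⟨a, _|⟨b, t⟩⟩ <;> simp_all

lemma eq_singleton_of_length_one (l : List Int) (h : l.length = 1) : l = [l.getD 0 0] := by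
  rcases l with _|⟨a, _|⟨b, t⟩⟩ <;> simp_all

lemma getD_drop_take (L : List Int) (a m i : Nat) (h : i < m) :
    ((L.drop a).take m).getD i 0 = L.getD (a + i) 0 := by
  simp [List.getD, h, List.getElem?_drop]

lemma getLast_eq_getD (v : List Int) (h : v ≠ []) : v.getLast h = v.getD (v.length - 1) 0 := by
  rw [List.getLast_eq_getElem]
  simp [List.getD]
  rw [List.getElem?_eq_getElem (by have := List.length_pos_iff.mpr h; omega)]
  rfl

lemma getD_reverse (l : List Int) (i : Nat) (h : i < l.length) :
    l.reverse.getD i 0 = l.getD (l.length - 1 - i) 0 := by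
  simp [List.getD]
  rw [List.getElem?_eq_getElem (by simpa using h),
      List.getElem?_eq_getElem (by omega)]
  simp [List.getElem_reverse]

lemma drop_take_drop (L : List Int) (a m n : Nat) :
    ((L.drop a).take m).drop n = (L.drop (a + n)).take (m - n) := by
  rw [List.drop_take, List.drop_drop]
  try ring_nf

-- A's recursion in take/drop/reverse form
lemma ct1Go_succ (f : Nat) (v : List Int) (h : v ≠ []) :
    ct1Go (f+1) v =
      if PySem.Int.mod (v.getLast h) 2 = 0 then
        [7, (PySem.List.max? (v.take 2) (fun x => x)).getD 0] ++ ct1Go f ((v.drop 2).reverse)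
      else ct1Go f (v.take (v.length - 2)) ++ [8, (v.take 2).sum] := by
  simp only [ct1Go]
  rw [dif_neg h]
  rw [PySem.List.pyGetD_neg_one v 0 h]
  simp only [PySem.List.slice?_none_none_neg_one, Option.getD_some]
  rw [PySem.List.slice_to_neg_ofNat v.reverse 2 (by omega),
      PySem.List.slice_to_neg_ofNat v 2 (by omega),
      PySem.List.slice_to v (show (0:Int) ≤ 2 by omega)]
  simp only [List.length_reverse]
  rw [rev_take_sub_two, show (2:Int).toNat = 2 from rfl]

lemma ct1Go_nil (f : Nat) : ct1Go f [] = [] := by cases f <;> simp [ct1Go]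

lemma ct1Go_congr : ∀ (f g : Nat) (L : List Int), L.length ≤ f → L.length ≤ g →
    ct1Go f L = ct1Go g L := by
  intro f
  induction f using Nat.strong_induction_on with
  | _ f IH =>
    intro g L hf hg
    by_cases hL : L = []
    · rw [hL, ct1Go_nil, ct1Go_nil]
    · have h1 : 1 ≤ L.length := List.length_pos_iff.mpr hL
      obtain ⟨f', rfl⟩ : ∃ f', f = f' + 1 := ⟨f - 1, by omega⟩
      obtain ⟨g', rfl⟩ : ∃ g', g = g' + 1 := ⟨g - 1, by omega⟩
      rw [ct1Go_succ f' L hL, ct1Go_succ g' L hL]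
      by_cases hpar : PySem.Int.mod (L.getLast hL) 2 = 0
      · rw [if_pos hpar, if_pos hpar,
            IH f' (by omega) g' ((L.drop 2).reverse) (by simp; omega) (by simp; omega)]
      · rw [if_neg hpar, if_neg hpar,
            IH f' (by omega) g' (L.take (L.length - 2)) (by simp; omega) (by simp; omega)]

lemma ct1_eq (v : List Int) (h : v ≠ []) :
    ct1 v =
      if PySem.Int.mod (v.getLast h) 2 = 0 then
        [7, (PySem.List.max? (v.take 2) (fun x => x)).getD 0] ++ ct1 ((v.drop 2).reverse)
      else ct1 (v.take (v.length - 2)) ++ [8, (v.take 2).sum] := by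
  have h1 : 1 ≤ v.length := List.length_pos_iff.mpr h
  unfold ct1
  obtain ⟨k, hk⟩ : ∃ k, v.length = k + 1 := ⟨v.length - 1, by omega⟩
  rw [hk, ct1Go_succ k v h]
  simp only [hk]
  rw [ct1Go_congr k ((v.drop 2).reverse).length ((v.drop 2).reverse) (by simp; omega) (by omega),
      ct1Go_congr k (v.take (k + 1 - 2)).length (v.take (k + 1 - 2)) (by simp) (by omega)]

lemma ct1_nil : ct1 [] = [] := by rw [ct1, ct1Go_nil]

-- loop invariant: the loop returns front ++ ct1 (current view) ++ back.reverse, where the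
-- current view is the segment [lo..hi] of L read in the current direction
lemma loop_spec (L : List Int) : ∀ (m fuel : Nat) (lo hi : Int) (fwd : Bool) (front back : List Int),
    m = (hi + 1 - lo).toNat → m ≤ fuel → 0 ≤ lo → hi < (L.length : Int) →
    ct1Loop L fuel lo hi fwd front back =
      front ++ ct1 (if fwd then (L.drop lo.toNat).take m
                    else ((L.drop lo.toNat).take m).reverse) ++ back.reverse := by
  intro m
  induction m using Nat.strong_induction_on with
  | _ m IH =>
    intro fuel lo hi fwd front back hm hfuel hlo hhi
    by_cases hle : lo ≤ hi
    · -- loop body runs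
      have hm1 : 1 ≤ m := by omega
      have haN : lo.toNat + m ≤ L.length := by omega
      have hhiN : hi.toNat = lo.toNat + m - 1 := by omega
      set seg : List Int := (L.drop lo.toNat).take m with hseg
      have hlen : seg.length = m := by rw [hseg]; simp; omega
      have hne : seg ≠ [] := by
        intro hc; rw [hc] at hlen; simp at hlen; omega
      have hne' : seg.reverse ≠ [] := by simpa using hne
      have hlastF : seg.getLast hne = L.getD (lo.toNat + (m-1)) 0 := by
        rw [getLast_eq_getD, hlen, hseg, getD_drop_take L lo.toNat m (m-1) (by omega)]
      have hlastB : seg.reverse.getLast hne' = L.getD lo.toNat 0 := by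
        rw [getLast_eq_getD, List.length_reverse, hlen,
            getD_reverse _ _ (by omega), hlen, hseg,
            getD_drop_take L lo.toNat m _ (by omega)]
        congr 1
        omega
      have htwoF : seg.take 2 =
          (if lo = hi then [L.getD lo.toNat 0]
           else [L.getD lo.toNat 0, L.getD (lo+1).toNat 0]) := by
        by_cases h1 : lo = hi
        · rw [if_pos h1, List.take_of_length_le (by omega),
              eq_singleton_of_length_one seg (by omega), hseg,
              getD_drop_take L lo.toNat m 0 (by omega)]
          simp
        · have hm2 : 2 ≤ m := by omega
          rw [if_neg h1, take_two_of_le seg (by omega), hseg,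
              getD_drop_take L lo.toNat m 0 (by omega), getD_drop_take L lo.toNat m 1 (by omega)]
          have e1 : (lo+1).toNat = lo.toNat + 1 := by omega
          rw [e1]
          simp
      have htwoB : seg.reverse.take 2 =
          (if lo = hi then [L.getD lo.toNat 0]
           else [L.getD hi.toNat 0, L.getD (hi-1).toNat 0]) := by
        by_cases h1 : lo = hi
        · rw [if_pos h1, List.take_of_length_le (by simp; omega),
              eq_singleton_of_length_one seg.reverse (by simp; omega),
              getD_reverse _ _ (by omega), hlen, hseg,
              getD_drop_take L lo.toNat m _ (by omega)]
          congr 2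
          omega
        · have hm2 : 2 ≤ m := by omega
          rw [if_neg h1, take_two_of_le seg.reverse (by simp; omega),
              getD_reverse _ _ (by omega), getD_reverse _ _ (by omega), hlen, hseg,
              getD_drop_take L lo.toNat m _ (by omega), getD_drop_take L lo.toNat m _ (by omega)]
          have e1 : hi.toNat = lo.toNat + (m - 1 - 0) := by omega
          have e2 : (hi-1).toNat = lo.toNat + (m - 1 - 1) := by omega
          rw [e1, e2]
      obtain ⟨k, rfl⟩ : ∃ k, fuel = k + 1 := ⟨fuel - 1, by omega⟩
      simp only [ct1Loop]
      rw [if_pos hle]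
      cases fwd with
      | true =>
        simp only [if_true, Bool.not_true]
        rw [ct1_eq seg hne, hlastF, htwoF]
        have hlast' : L.getD hi.toNat 0 = L.getD (lo.toNat + (m-1)) 0 := by
          rw [hhiN]; congr 1; omega
        rw [hlast']
        by_cases hpar : PySem.Int.mod (L.getD (lo.toNat + (m-1)) 0) 2 = 0
        · rw [if_pos hpar, if_pos hpar,
              IH (m-2) (by omega) k (lo+2) hi false _ _ (by omega) (by omega) (by omega) hhi]
          have e2 : (lo+2).toNat = lo.toNat + 2 := by omega
          rw [e2]
          have harg : (seg.drop 2).reverse = ((L.drop (lo.toNat+2)).take (m-2)).reverse := by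
            rw [hseg, drop_take_drop]
          rw [harg]
          simp
        · rw [if_neg hpar, if_neg hpar,
              IH (m-2) (by omega) k lo (hi-2) true _ _ (by omega) (by omega) hlo (by omega)]
          have harg : seg.take (seg.length - 2) = (L.drop lo.toNat).take (m-2) := by
            rw [hlen, hseg, List.take_take]
            congr 1
            omega
          rw [harg]
          simp
      | false =>
        simp only [show (false = true) = False by simp, if_false, Bool.not_false]
        rw [ct1_eq seg.reverse hne', hlastB, htwoB]
        by_cases hpar : PySem.Int.mod (L.getD lo.toNat 0) 2 = 0
        · rw [if_pos hpar, if_pos hpar,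
              IH (m-2) (by omega) k lo (hi-2) true _ _ (by omega) (by omega) hlo (by omega)]
          have harg : (seg.reverse.drop 2).reverse = (L.drop lo.toNat).take (m-2) := by
            rw [List.drop_reverse, List.reverse_reverse, hlen, hseg, List.take_take]
            congr 1
            omega
          rw [harg]
          simp
        · rw [if_neg hpar, if_neg hpar,
              IH (m-2) (by omega) k (lo+2) hi false _ _ (by omega) (by omega) (by omega) hhi]
          have e2 : (lo+2).toNat = lo.toNat + 2 := by omega
          rw [e2]
          have harg : seg.reverse.take (seg.reverse.length - 2) =
              ((L.drop (lo.toNat+2)).take (m-2)).reverse := by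
            rw [List.length_reverse, rev_take_sub_two seg, hseg, drop_take_drop]
          rw [harg]
          simp
    · -- loop exits: the view is empty
      have hm0 : m = 0 := by omega
      subst hm0
      cases fuel with
      | zero => simp [ct1Loop, ct1_nil]
      | succ k =>
        simp only [ct1Loop]
        rw [if_neg hle]
        simp [ct1_nil]

-- ===== VERDICT (by name: the statement is the Claim_ definition above) =====
theorem ct1_spec : Claim_equal_ct1 := by
  intro L _
  unfold Spec_ct1 ct1_alt
  rw [loop_spec L L.length L.length 0 ((L.length : Int) - 1) true [] [] (by omega) (by omega) (by omega) (by omega)]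
  simp
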